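-- pv_equiv track=rewrite | github.com/K0toulas/eidiko_thema_v3 | parse_scheduler_log.py | count_ep_moves
-- ===== SOURCE A (Python) =====
-- def classify_psr(psr: int) -> str:
--     if 0 <= psr <= 7:
--         return "P"
--     if 8 <= psr <= 15:
--         return "E"
--     return "OTHER"
--
-- def count_ep_moves(psr_changes):
--     """
--     Counts transitions between E and P based on the PSR change list.
--     Returns (e_to_p, p_to_e, other_moves)
--     """
--     if not psr_changes or len(psr_changes) < 2:
--         return 0, 0, 0
--
--     psrs = [psr for _, psr in psr_changes]
--     e_to_p = 0
--     p_to_e = 0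
--     other = 0
--
--     prev_cls = classify_psr(psrs[0])
--     for psr in psrs[1:]:
--         cur_cls = classify_psr(psr)
--         if prev_cls == "E" and cur_cls == "P":
--             e_to_p += 1
--         elif prev_cls == "P" and cur_cls == "E":
--             p_to_e += 1
--         elif prev_cls != cur_cls:
--             other += 1
--         prev_cls = cur_cls
--
--     return e_to_p, p_to_e, other
-- ===== SOURCE B (Python) =====
-- def classify_psr(psr: int) -> str:
--     if 0 <= psr <= 7:
--         return "P"
--     if 8 <= psr <= 15:
--         return "E"
--     return "OTHER"
--
-- def count_ep_moves(psr_changes):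
--     if not psr_changes or len(psr_changes) < 2:
--         return 0, 0, 0
--     # 1) run-length-compress the class sequence: one label per maximal run
--     runs = []
--     for _, psr in psr_changes:
--         c = classify_psr(psr)
--         if not runs or runs[-1] != c:
--             runs.append(c)
--     # 2) bigram frequency table over run boundaries; every boundary is exactly
--     #    one transition, so 'other' is the total boundary count minus the E/P cells
--     bigrams = {}
--     for pair in zip(runs, runs[1:]):
--         bigrams[pair] = bigrams.get(pair, 0) + 1
--     e_to_p = bigrams.get(("E", "P"), 0)
--     p_to_e = bigrams.get(("P", "E"), 0)
--     other = len(runs) - 1 - e_to_p - p_to_e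
--     return e_to_p, p_to_e, other
-- ===== Notes on version B (the rewrite author's own statement) =====
-- stated objective: alternative
-- what changed: Instead of A's single stateful prev/cur scan with three counters, B first run-length-compresses the class sequence (one label per maximal run), then builds a bigram frequency table over run boundaries and reads e_to_p/p_to_e from its (E,P)/(P,E) cells, deriving other arithmetically as (number of runs - 1) - e_to_p - p_to_e since every run boundary is exactly one transition.
import Mathlib
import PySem

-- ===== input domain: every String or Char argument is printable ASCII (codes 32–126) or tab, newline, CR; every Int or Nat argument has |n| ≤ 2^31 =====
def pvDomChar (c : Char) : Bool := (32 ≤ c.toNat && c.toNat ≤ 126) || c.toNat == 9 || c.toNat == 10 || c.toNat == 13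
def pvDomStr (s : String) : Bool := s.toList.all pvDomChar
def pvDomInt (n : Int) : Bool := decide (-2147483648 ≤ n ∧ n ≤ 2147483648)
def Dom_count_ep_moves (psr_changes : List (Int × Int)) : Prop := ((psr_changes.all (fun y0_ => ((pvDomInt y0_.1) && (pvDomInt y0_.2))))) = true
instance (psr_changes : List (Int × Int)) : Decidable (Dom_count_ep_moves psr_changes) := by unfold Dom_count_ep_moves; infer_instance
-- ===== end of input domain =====

-- B replaces A's stateful prev/cur scan by run-length-compressing the class
-- sequence, tallying run boundaries in a bigram table, and deriving 'other'
-- arithmetically (objective: alternative; same O(n) cost).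

-- ===== PORT A =====
def classify_psr (psr : Int) : String :=
  if 0 ≤ psr ∧ psr ≤ 7 then "P"
  else if 8 ≤ psr ∧ psr ≤ 15 then "E"
  else "OTHER"

-- A's loop: state (prev_cls, e_to_p, p_to_e, other), one step per psr in psrs[1:]
def pvStepA (st : String × Int × Int × Int) (psr : Int) : String × Int × Int × Int :=
  let cur_cls := classify_psr psr
  let (prev_cls, e, p, o) := st
  if prev_cls = "E" ∧ cur_cls = "P" then (cur_cls, e + 1, p, o)
  else if prev_cls = "P" ∧ cur_cls = "E" then (cur_cls, e, p + 1, o)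
  else if prev_cls ≠ cur_cls then (cur_cls, e, p, o + 1)
  else (cur_cls, e, p, o)

def count_ep_moves (psr_changes : List (Int × Int)) : Int × Int × Int :=
  -- 'not psr_changes or len(psr_changes) < 2' is exactly 'length < 2'
  if psr_changes.length < 2 then (0, 0, 0)
  else
    let psrs := psr_changes.map (fun y => y.2)
    match psrs with
    | [] => (0, 0, 0)  -- unreachable: length ≥ 2
    | p0 :: rest =>
      let r := rest.foldl pvStepA (classify_psr p0, 0, 0, 0)
      (r.2.1, r.2.2.1, r.2.2.2)

-- ===== PORT B =====
-- B's first loop: 'if not runs or runs[-1] != c: runs.append(c)'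
def pvStepRuns (runs : List String) (y : Int × Int) : List String :=
  let c := classify_psr y.2
  if runs.isEmpty || runs.getLast? != some c then runs ++ [c] else runs

def count_ep_moves_alt (psr_changes : List (Int × Int)) : Int × Int × Int :=
  if psr_changes.length < 2 then (0, 0, 0)
  else
    let runs := psr_changes.foldl pvStepRuns []
    -- bigram table over zip(runs, runs[1:]): bigrams[pair] = bigrams.get(pair, 0) + 1
    let bigrams : PySem.Dict (String × String) Int :=
      (runs.zip runs.tail).foldl (fun d q => d.insert q (d.getD q 0 + 1)) PySem.Dict.empty
    let e_to_p := bigrams.getD ("E", "P") 0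
    let p_to_e := bigrams.getD ("P", "E") 0
    let other := (runs.length : Int) - 1 - e_to_p - p_to_e
    (e_to_p, p_to_e, other)

-- ===== PRECONDITION & SPEC =====
def Spec_count_ep_moves (psr_changes : List (Int × Int)) (out : Int × Int × Int) : Prop := out = count_ep_moves_alt psr_changes
instance (psr_changes : List (Int × Int)) (out : Int × Int × Int) : Decidable (Spec_count_ep_moves psr_changes out) := by unfold Spec_count_ep_moves; infer_instance

-- ===== CLAIM (what is proved, stated in full; the proofs are below) =====
def Claim_equal_count_ep_moves : Prop := ∀ (psr_changes : List (Int × Int)), Dom_count_ep_moves psr_changes → Spec_count_ep_moves psr_changes (count_ep_moves psr_changes)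

-- ===== LEMMAS AND PROOFS =====

-- destutter of a label list relative to a preceding label x
def pvD (x : String) : List String → List String
  | [] => []
  | c :: t => if x = c then pvD c t else c :: pvD c t

-- B's run-building fold computes x :: pvD x l (front label x, then the changes)
theorem pvRuns_eq (l : List (Int × Int)) (r : List String) (x : String)
    (h : r.getLast? = some x) :
    l.foldl pvStepRuns r = r ++ (pvD x (l.map (fun y => classify_psr y.2))) := by
  induction l generalizing r x with
  | nil => simp [pvD]
  | cons y t ih =>
    have hr : r ≠ [] := by intro hr0; simp [hr0] at h
    simp only [List.foldl_cons, List.map_cons, pvD]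
    by_cases hx : x = classify_psr y.2
    · have : pvStepRuns r y = r := by
        simp [pvStepRuns, List.isEmpty_eq_false_iff.mpr hr, h, hx]
      rw [this, if_pos hx, ih r (classify_psr y.2) (hx ▸ h)]
    · have : pvStepRuns r y = r ++ [classify_psr y.2] := by
        simp only [pvStepRuns]
        have : (r.getLast? != some (classify_psr y.2)) = true := by
          simp only [h, bne_iff_ne, ne_eq]; exact fun hc => hx (Option.some.inj hc)
        simp [this]
      rw [this, if_neg hx,
        ih (r ++ [classify_psr y.2]) (classify_psr y.2) (by simp)]
      simp

-- counting an UNEQUAL pattern over adjacent pairs is invariant under destutter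
theorem pvCnt_eq (u v : String) (huv : u ≠ v) (l : List String) (x : String) :
    ((x :: pvD x l).zip (pvD x l)).count (u, v) = ((x :: l).zip l).count (u, v) := by
  induction l generalizing x with
  | nil => simp [pvD]
  | cons c t ih =>
    by_cases hx : x = c
    · subst hx
      have hD : pvD x (x :: t) = pvD x t := if_pos rfl
      rw [hD, ih x, List.zip_cons_cons, List.count_cons]
      have hne : ¬ (((x, x) == (u, v)) = true) := by
        simp only [beq_iff_eq, Prod.mk.injEq, not_and]
        intro h1 h2; exact huv (h1.symm ▸ h2.symm ▸ rfl)
      simp [hne]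
    · have hD : pvD x (c :: t) = c :: pvD c t := if_neg hx
      rw [hD, List.zip_cons_cons, List.count_cons, List.zip_cons_cons, List.count_cons, ih c]

-- the number of changed labels equals the number of unequal adjacent pairs
theorem pvLenD (l : List String) (x : String) :
    (pvD x l).length = ((x :: l).zip l).countP (fun q => q.1 ≠ q.2) := by
  induction l generalizing x with
  | nil => simp [pvD]
  | cons c t ih =>
    by_cases hx : x = c
    · subst hx
      have hD : pvD x (x :: t) = pvD x t := if_pos rfl
      rw [hD, ih x, List.zip_cons_cons, List.countP_cons]; simp
    · have hD : pvD x (c :: t) = c :: pvD c t := if_neg hx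
      rw [hD, List.length_cons, ih c, List.zip_cons_cons, List.countP_cons]
      simp [hx]

-- Loop invariant for A (as in the previous file): the fold adds the pair counts
set_option maxHeartbeats 1000000 in
theorem pvFold_eq (xs : List Int) (c : String) (e p o : Int) :
    (xs.foldl pvStepA (c, e, p, o)).2.1
      = e + (((c :: xs.map classify_psr).zip (xs.map classify_psr)).count ("E", "P") : Int) ∧
    (xs.foldl pvStepA (c, e, p, o)).2.2.1
      = p + (((c :: xs.map classify_psr).zip (xs.map classify_psr)).count ("P", "E") : Int) ∧
    (xs.foldl pvStepA (c, e, p, o)).2.2.2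
      = o + ((((c :: xs.map classify_psr).zip (xs.map classify_psr)).countP
                (fun q => q.1 ≠ q.2) : Int)
               - (((c :: xs.map classify_psr).zip (xs.map classify_psr)).count ("E", "P") : Int)
               - (((c :: xs.map classify_psr).zip (xs.map classify_psr)).count ("P", "E") : Int)) := by
  induction xs generalizing c e p o with
  | nil => simp
  | cons y t ih =>
    have hstep : pvStepA (c, e, p, o) y =
        (classify_psr y,
         e + (if c = "E" ∧ classify_psr y = "P" then 1 else 0),
         p + (if c = "P" ∧ classify_psr y = "E" then 1 else 0),
         o + (if ¬(c = "E" ∧ classify_psr y = "P") ∧ ¬(c = "P" ∧ classify_psr y = "E")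
                ∧ c ≠ classify_psr y then 1 else 0)) := by
      simp only [pvStepA]
      split_ifs with h1 h2 h3 <;> simp_all
    rw [List.foldl_cons, hstep]
    obtain ⟨h1, h2, h3⟩ := ih (classify_psr y)
        (e + (if c = "E" ∧ classify_psr y = "P" then 1 else 0))
        (p + (if c = "P" ∧ classify_psr y = "E" then 1 else 0))
        (o + (if ¬(c = "E" ∧ classify_psr y = "P") ∧ ¬(c = "P" ∧ classify_psr y = "E")
                ∧ c ≠ classify_psr y then 1 else 0))
    refine ⟨?_, ?_, ?_⟩ <;>
      · simp only [h1, h2, h3, List.map_cons, List.zip_cons_cons, List.count_cons,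
          List.countP_cons]
        clear h1 h2 h3
        generalize classify_psr y = cy at *
        by_cases hE : c = "E" <;> by_cases hP : c = "P" <;>
          by_cases hyE : cy = "E" <;> by_cases hyP : cy = "P" <;>
          by_cases hne : c = cy <;>
          simp_all <;> omega

-- ===== VERDICT (by name: the statement is the Claim_ definition above) =====
theorem count_ep_moves_spec : Claim_equal_count_ep_moves := by
  intro xs _
  unfold Spec_count_ep_moves count_ep_moves count_ep_moves_alt
  by_cases hlen : xs.length < 2
  · simp [hlen]
  · simp only [hlen, if_false]
    match xs with
    | [] => simp at hlen
    | (a0, p0) :: rest =>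
      obtain ⟨h1, h2, h3⟩ := pvFold_eq (rest.map (fun y => y.2)) (classify_psr p0) 0 0 0
      simp only [List.map_map, Function.comp_def] at h1 h2 h3
      have hruns : ((a0, p0) :: rest).foldl pvStepRuns []
          = classify_psr p0 :: pvD (classify_psr p0) (rest.map (fun y => classify_psr y.2)) := by
        have h0 : pvStepRuns [] (a0, p0) = [classify_psr p0] := by simp [pvStepRuns]
        rw [List.foldl_cons, h0, pvRuns_eq rest [classify_psr p0] (classify_psr p0) (by simp)]
        simp
      have hd : ∀ (rs : List (String × String)) (v : String × String),
          ((rs.foldl (fun d q => d.insert q (d.getD q 0 + 1))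
              (PySem.Dict.empty : PySem.Dict (String × String) Int)).getD v 0)
            = (rs.count v : Int) := by
        intro rs v
        rw [PySem.Dict.getD_foldl_insert_add_one]
        have : (PySem.Dict.empty : PySem.Dict (String × String) Int).getD v 0 = 0 := rfl
        rw [this, zero_add]
      simp only [List.map_cons, hruns, List.tail_cons, hd, h1, h2, h3,
        pvCnt_eq "E" "P" (by decide), pvCnt_eq "P" "E" (by decide),
        List.length_cons, pvLenD, Prod.mk.injEq]
      refine ⟨by omega, by omega, by omega⟩
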